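-- pv_equiv track=rewrite | github.com/janderson3435/abides-MSc | agent/brokers/BrokerAgent.py | findSubsetsSumDivisbleN
-- ===== SOURCE A (Python) =====
-- from copy import deepcopy
-- from copy import deepcopy
--
-- def findSubsetsSumDivisbleN(q, arr, n):
--     # TODO: this is a bit of a hack solution,
--     # if possible use full dynamic programming method that finds largest subset
--     # takes pairs of ids and quantities
--     # find all subsets of arr with sum divisible by n
--     # uses greedy/dynamic algorithm with a search limit
--
--     # first check all pairs
--     pair_sums = []
--     for id, qq in arr:
--         if (q + qq) % n == 0:
--             return ([id])
--         else:
--             pair_sums.append(([id], (q + qq)))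
--
--     # if no pair found, check all triplets
--     triplet_sums = []
--     for ids, qq in pair_sums:
--         for id, qqq in arr:
--             if id not in ids:
--                 if (qq + qqq) % n == 0:
--                     ids.append(id)
--                     return (ids)
--                 else:
--                     a = deepcopy(ids)
--                     a.append(id)
--                     triplet_sums.append((a, (qq + qqq)))
--
--     # finally check quadruplets
--     quadruplet_sums = []
--     for ids, qq in triplet_sums:
--         for id, qqq in arr:
--             if id not in ids:
--                 if (qq + qqq) % n == 0:
--                     ids.append(id)
--                     return (ids)
--                 else:
--                     a = deepcopy(ids)
--                     a.append(id)
--                     quadruplet_sums.append((a, (qq + qqq)))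
--
--     return None # no subset found
-- ===== SOURCE B (Python) =====
-- def findSubsetsSumDivisbleN(q, arr, n):
--     # Residue-class index: one dict residue -> ids in arr order, then per-prefix O(1)-ish lookups
--     if not arr:
--         return None
--     buckets = {}
--     for id, qq in arr:
--         r = qq % n
--         buckets[r] = buckets.get(r, []) + [id]
--
--     def pick(s, excluded):
--         # first id (in arr order) with (s + qq) % n == 0 and id not in excluded
--         for id in buckets.get((-s) % n, []):
--             if id not in excluded:
--                 return id
--         return None
--
--     id1 = pick(q, [])
--     if id1 is not None:
--         return [id1]
--     for id1, qq1 in arr: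
--         id2 = pick(q + qq1, [id1])
--         if id2 is not None:
--             return [id1, id2]
--     for id1, qq1 in arr:
--         for id2, qq2 in arr:
--             if id2 != id1:
--                 id3 = pick(q + qq1 + qq2, [id1, id2])
--                 if id3 is not None:
--                     return [id1, id2, id3]
--     return None
-- ===== Notes on version B (the rewrite author's own statement) =====
-- stated objective: faster
-- what changed: Replaces A's staged brute-force enumeration (which materializes all pair/triplet candidate lists, with deepcopy, even after failure) by a residue-class dict (residue -> ids in arr order) queried once per prefix for the lexicographically-first completing element.
import Mathlib
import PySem

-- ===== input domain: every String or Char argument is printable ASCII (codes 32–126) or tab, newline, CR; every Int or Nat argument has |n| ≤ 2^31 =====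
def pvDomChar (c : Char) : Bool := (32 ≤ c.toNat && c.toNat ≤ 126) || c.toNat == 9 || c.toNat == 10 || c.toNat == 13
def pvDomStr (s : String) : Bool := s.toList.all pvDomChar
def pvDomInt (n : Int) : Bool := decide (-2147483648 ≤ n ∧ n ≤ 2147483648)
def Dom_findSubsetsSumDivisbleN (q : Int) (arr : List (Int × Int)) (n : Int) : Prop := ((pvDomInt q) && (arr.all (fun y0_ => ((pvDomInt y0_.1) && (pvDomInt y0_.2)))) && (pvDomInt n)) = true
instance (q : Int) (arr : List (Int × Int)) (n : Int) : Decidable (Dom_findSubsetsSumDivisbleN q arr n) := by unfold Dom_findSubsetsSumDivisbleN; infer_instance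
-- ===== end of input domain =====

-- B replaces A's staged brute-force enumeration (materializing all pair/triplet candidate
-- lists) by a residue-class dict queried once per prefix; objective: faster (asymptotic).

-- ===== PORT A =====
-- first loop: check all singletons, else collect ([id], q+qq)
def pvA_pairLoop (q n : Int) : List (Int × Int) → List (List Int × Int) →
    Sum (List Int) (List (List Int × Int))
  | [], acc => .inr acc
  | p :: rest, acc =>
    if PySem.Int.mod (q + p.2) n = 0 then .inl [p.1]
    else pvA_pairLoop q n rest (acc ++ [([p.1], q + p.2)])

-- inner 'for id, qqq in arr' of the second/third loops (ids = prefix, qq = its sum)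
def pvA_inner (n qq : Int) (ids : List Int) : List (Int × Int) → List (List Int × Int) →
    Sum (List Int) (List (List Int × Int))
  | [], acc => .inr acc
  | p :: rest, acc =>
    if !(ids.contains p.1) then
      if PySem.Int.mod (qq + p.2) n = 0 then .inl (ids ++ [p.1])
      else pvA_inner n qq ids rest (acc ++ [(ids ++ [p.1], qq + p.2)])
    else pvA_inner n qq ids rest acc

-- outer 'for ids, qq in <sums>' of the second/third loops (they are textually identical)
def pvA_outer (n : Int) (arr : List (Int × Int)) : List (List Int × Int) → List (List Int × Int) →
    Sum (List Int) (List (List Int × Int))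
  | [], acc => .inr acc
  | pr :: rest, acc =>
    match pvA_inner n pr.2 pr.1 arr acc with
    | .inl r => .inl r
    | .inr acc' => pvA_outer n arr rest acc'

def findSubsetsSumDivisbleN (q : Int) (arr : List (Int × Int)) (n : Int) : Option (List Int) :=
  match pvA_pairLoop q n arr [] with
  | .inl r => some r
  | .inr pair_sums =>
    match pvA_outer n arr pair_sums [] with
    | .inl r => some r
    | .inr triplet_sums =>
      match pvA_outer n arr triplet_sums [] with
      | .inl r => some r
      | .inr _ => none

-- ===== PORT B =====
-- buckets: residue of qq mod n ↦ ids in arr order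
def pvB_buckets (n : Int) (arr : List (Int × Int)) : PySem.Dict Int (List Int) :=
  arr.foldl (fun d p => d.modify (PySem.Int.mod p.2 n) [] (· ++ [p.1])) PySem.Dict.empty

-- pick s excluded: first id (in arr order) with (s + qq) % n == 0 and id not excluded
def pvB_pick (buckets : PySem.Dict Int (List Int)) (n s : Int) (excl : List Int) : Option Int :=
  (buckets.getD (PySem.Int.mod (-s) n) []).find? (fun id => !(excl.contains id))

def findSubsetsSumDivisbleN_alt (q : Int) (arr : List (Int × Int)) (n : Int) : Option (List Int) :=
  if arr.isEmpty then none else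
  let buckets := pvB_buckets n arr
  match pvB_pick buckets n q [] with
  | some id1 => some [id1]
  | none =>
    match arr.findSome? (fun p1 =>
        (pvB_pick buckets n (q + p1.2) [p1.1]).map (fun id2 => [p1.1, id2])) with
    | some r => some r
    | none =>
      arr.findSome? (fun p1 => arr.findSome? (fun p2 =>
        if p2.1 ≠ p1.1 then
          (pvB_pick buckets n (q + p1.2 + p2.2) [p1.1, p2.1]).map
            (fun id3 => [p1.1, p2.1, id3])
        else none))

-- ===== PRECONDITION & SPEC =====
-- Pre_ excludes exactly the inputs where Python A raises ZeroDivisionError (n = 0 with a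
-- nonempty arr reaches '% n'); A returns on every input admitted here.
def Pre_findSubsetsSumDivisbleN (q : Int) (arr : List (Int × Int)) (n : Int) : Prop :=
  arr = [] ∨ n ≠ 0
instance (q : Int) (arr : List (Int × Int)) (n : Int) : Decidable (Pre_findSubsetsSumDivisbleN q arr n) := by unfold Pre_findSubsetsSumDivisbleN; infer_instance

def pvWitness_findSubsetsSumDivisbleN : Int × (List (Int × Int)) × Int := (1, [(7, 2), (8, 5)], 3)

def Spec_findSubsetsSumDivisbleN (q : Int) (arr : List (Int × Int)) (n : Int) (out : Option (List Int)) : Prop := out = findSubsetsSumDivisbleN_alt q arr n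
instance (q : Int) (arr : List (Int × Int)) (n : Int) (out : Option (List Int)) : Decidable (Spec_findSubsetsSumDivisbleN q arr n out) := by unfold Spec_findSubsetsSumDivisbleN; infer_instance

-- ===== CLAIM (what is proved, stated in full; the proofs are below) =====
def Claim_equal_findSubsetsSumDivisbleN : Prop := ∀ (q : Int) (arr : List (Int × Int)) (n : Int), Dom_findSubsetsSumDivisbleN q arr n → Pre_findSubsetsSumDivisbleN q arr n → Spec_findSubsetsSumDivisbleN q arr n (findSubsetsSumDivisbleN q arr n)

-- ===== LEMMAS AND PROOFS =====

theorem pv_mod_cong (x y n : Int) (hn : n ≠ 0) :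
    PySem.Int.mod x n = PySem.Int.mod y n ↔ n ∣ (x - y) := by
  have hx := PySem.Int.floordiv_mul_add_mod x n
  have hy := PySem.Int.floordiv_mul_add_mod y n
  constructor
  · intro h
    exact ⟨PySem.Int.floordiv x n - PySem.Int.floordiv y n, by linarith [hx, hy, h]⟩
  · rintro ⟨k, hk⟩
    have hd : PySem.Int.mod x n - PySem.Int.mod y n
        = n * (k - PySem.Int.floordiv x n + PySem.Int.floordiv y n) := by
      linear_combination hk + hx - hy
    have habs : |PySem.Int.mod x n - PySem.Int.mod y n| < |n| := by
      rcases lt_or_gt_of_ne hn with hneg | hpos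
      · have b1 := PySem.Int.mod_neg_bounds x hneg
        have b2 := PySem.Int.mod_neg_bounds y hneg
        rw [abs_lt, abs_of_neg hneg]; omega
      · have b1l := PySem.Int.mod_nonneg x hpos
        have b1r := PySem.Int.mod_lt x hpos
        have b2l := PySem.Int.mod_nonneg y hpos
        have b2r := PySem.Int.mod_lt y hpos
        rw [abs_lt, abs_of_pos hpos]; omega
    rw [hd, abs_mul] at habs
    have ht : |k - PySem.Int.floordiv x n + PySem.Int.floordiv y n| < 1 := by
      have hn' : 0 < |n| := abs_pos.mpr hn
      nlinarith [abs_nonneg (k - PySem.Int.floordiv x n + PySem.Int.floordiv y n)]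
    have : k - PySem.Int.floordiv x n + PySem.Int.floordiv y n = 0 := by
      rwa [Int.abs_lt_one_iff] at ht
    rw [this, mul_zero] at hd
    omega

theorem pv_map_findSome? {α β γ : Type} (l : List α) (f : α → Option β) (g : β → γ) :
    (l.findSome? f).map g = l.findSome? (fun x => (f x).map g) := by
  induction l with
  | nil => rfl
  | cons a t ih => cases h : f a <;> simp [h, ih]

theorem pv_findSome?_filter {α β : Type} (l : List α) (c : α → Bool) (f : α → Option β) :
    (l.filter c).findSome? f = l.findSome? (fun x => if c x then f x else none) := by
  induction l with
  | nil => rfl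
  | cons a t ih => by_cases h : c a <;> simp [h, List.findSome?_cons, ih]

theorem pv_findSome?_flatMap {α β γ : Type} (l : List α) (g : α → List β) (f : β → Option γ) :
    (l.flatMap g).findSome? f = l.findSome? (fun x => (g x).findSome? f) := by
  induction l with
  | nil => rfl
  | cons a t ih =>
    rw [List.flatMap_cons, List.findSome?_append, List.findSome?_cons]
    cases h : (g a).findSome? f <;> simp [ih]

def pvHit (n qq : Int) (ids : List Int) (p : Int × Int) : Option (List Int) :=
  if !(ids.contains p.1) then
    (if PySem.Int.mod (qq + p.2) n = 0 then some (ids ++ [p.1]) else none)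
  else none

theorem pvA_pairLoop_eq (q n : Int) (l : List (Int × Int)) (acc : List (List Int × Int)) :
    pvA_pairLoop q n l acc =
      match l.findSome? (fun p => if PySem.Int.mod (q + p.2) n = 0 then some [p.1] else none) with
      | some r => .inl r
      | none => .inr (acc ++ l.map (fun p => ([p.1], q + p.2))) := by
  induction l generalizing acc with
  | nil => simp [pvA_pairLoop]
  | cons a t ih =>
    by_cases h : PySem.Int.mod (q + a.2) n = 0 <;>
      simp [pvA_pairLoop, h, ih]

theorem pvA_inner_eq (n qq : Int) (ids : List Int) (l : List (Int × Int))
    (acc : List (List Int × Int)) :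
    pvA_inner n qq ids l acc =
      match l.findSome? (pvHit n qq ids) with
      | some r => .inl r
      | none => .inr (acc ++ (l.filter (fun p => !(ids.contains p.1))).map
          (fun p => (ids ++ [p.1], qq + p.2))) := by
  induction l generalizing acc with
  | nil => simp [pvA_inner]
  | cons a t ih =>
    by_cases hm : a.1 ∈ ids
    · cases hfs : t.findSome? (pvHit n qq ids) <;>
        simp [pvA_inner, hm, pvHit, ih, hfs]
    · by_cases h : PySem.Int.mod (qq + a.2) n = 0
      · simp [pvA_inner, hm, h, pvHit]
      · cases hfs : t.findSome? (pvHit n qq ids) <;>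
          simp [pvA_inner, hm, h, pvHit, ih, hfs]

theorem pvA_outer_eq (n : Int) (arr : List (Int × Int)) (prefixes : List (List Int × Int))
    (acc : List (List Int × Int)) :
    pvA_outer n arr prefixes acc =
      match prefixes.findSome? (fun pr => arr.findSome? (pvHit n pr.2 pr.1)) with
      | some r => .inl r
      | none => .inr (acc ++ prefixes.flatMap (fun pr =>
          (arr.filter (fun p => !(pr.1.contains p.1))).map
            (fun p => (pr.1 ++ [p.1], pr.2 + p.2)))) := by
  induction prefixes generalizing acc with
  | nil => simp [pvA_outer]
  | cons a t ih =>
    rw [pvA_outer, pvA_inner_eq, List.findSome?_cons]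
    cases h : arr.findSome? (pvHit n a.2 a.1) with
    | some r => simp
    | none => simp [ih]

theorem pv_buckets_getD (n r : Int) (arr : List (Int × Int)) :
    (pvB_buckets n arr).getD r [] =
      (arr.filter (fun p => PySem.Int.mod p.2 n == r)).map (fun p => p.1) := by
  unfold pvB_buckets
  have h : arr.foldl (fun d p => d.modify (PySem.Int.mod p.2 n) [] (· ++ [p.1]))
        PySem.Dict.empty
      = (arr.map (fun p => (PySem.Int.mod p.2 n, p.1))).foldl
          (fun d p => d.modify p.1 [] (· ++ [p.2])) PySem.Dict.empty := by
    rw [List.foldl_map]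
  rw [h, PySem.Dict.getD_foldl_modify_append, List.filter_map, List.map_map]
  rfl

theorem pv_find_filter_map (l : List (Int × Int)) (c : Int × Int → Bool) (pr : Int → Bool) :
    ((l.filter c).map (fun p => p.1)).find? pr
      = l.findSome? (fun p => if c p && pr p.1 then some p.1 else none) := by
  induction l with
  | nil => rfl
  | cons a t ih =>
    by_cases hc : c a
    · by_cases hp : pr a.1 <;> simp [hc, hp, ih]
    · simp [hc, ih]

theorem pv_pick_eq (n s : Int) (hn : n ≠ 0) (excl : List Int) (arr : List (Int × Int)) :
    pvB_pick (pvB_buckets n arr) n s excl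
      = arr.findSome? (fun p =>
          if PySem.Int.mod (s + p.2) n == 0 && !(excl.contains p.1) then some p.1 else none) := by
  unfold pvB_pick
  rw [pv_buckets_getD, pv_find_filter_map]
  congr 1
  funext p
  have : (PySem.Int.mod p.2 n == PySem.Int.mod (-s) n) = (PySem.Int.mod (s + p.2) n == 0) := by
    rw [Bool.eq_iff_iff]
    simp only [beq_iff_eq]
    rw [PySem.Int.mod_eq_zero_iff_dvd, pv_mod_cong _ _ _ hn]
    constructor
    · rintro ⟨k, hk⟩; exact ⟨k, by linarith⟩
    · rintro ⟨k, hk⟩; exact ⟨k, by linarith⟩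
  rw [this]

theorem pv_stage1 (q n : Int) (hn : n ≠ 0) (arr : List (Int × Int)) :
    (pvB_pick (pvB_buckets n arr) n q []).map (fun id1 => [id1])
      = arr.findSome? (fun p => if PySem.Int.mod (q + p.2) n = 0 then some [p.1] else none) := by
  rw [pv_pick_eq n q hn, pv_map_findSome?]
  congr 1
  funext p
  by_cases h : PySem.Int.mod (q + p.2) n = 0 <;> simp [h]

theorem pv_stage2 (q n : Int) (hn : n ≠ 0) (arr : List (Int × Int)) :
    arr.findSome? (fun p1 =>
        (pvB_pick (pvB_buckets n arr) n (q + p1.2) [p1.1]).map (fun id2 => [p1.1, id2]))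
      = (arr.map (fun p => ([p.1], q + p.2))).findSome?
          (fun pr => arr.findSome? (pvHit n pr.2 pr.1)) := by
  rw [List.findSome?_map]
  congr 1
  funext p1
  rw [pv_pick_eq n (q + p1.2) hn, pv_map_findSome?]
  congr 1
  funext p2
  by_cases hm : p2.1 = p1.1 <;> by_cases h : PySem.Int.mod (q + p1.2 + p2.2) n = 0 <;>
    simp [pvHit, hm, h]

theorem pv_stage3 (q n : Int) (hn : n ≠ 0) (arr : List (Int × Int)) :
    arr.findSome? (fun p1 => arr.findSome? (fun p2 =>
        if p2.1 ≠ p1.1 then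
          (pvB_pick (pvB_buckets n arr) n (q + p1.2 + p2.2) [p1.1, p2.1]).map
            (fun id3 => [p1.1, p2.1, id3])
        else none))
      = ((arr.map (fun p => ([p.1], q + p.2))).flatMap (fun pr =>
          (arr.filter (fun p => !(pr.1.contains p.1))).map
            (fun p => (pr.1 ++ [p.1], pr.2 + p.2)))).findSome?
          (fun pr => arr.findSome? (pvHit n pr.2 pr.1)) := by
  rw [pv_findSome?_flatMap, List.findSome?_map]
  congr 1
  funext p1
  simp only [Function.comp_def]
  rw [List.findSome?_map, pv_findSome?_filter]
  congr 1
  funext p2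
  by_cases hm : p2.1 = p1.1
  · simp [hm]
  · simp only [hm, ne_eq, not_false_iff, if_true, List.contains_cons, List.contains_nil,
      Bool.or_false]
    rw [if_pos (by simp [hm]), pv_pick_eq n (q + p1.2 + p2.2) hn, pv_map_findSome?]
    congr 1
    funext p3
    by_cases hm3 : [p1.1, p2.1].contains p3.1 <;>
      by_cases h : PySem.Int.mod (q + p1.2 + p2.2 + p3.2) n = 0 <;>
        simp_all [pvHit]

theorem main_eq (q : Int) (arr : List (Int × Int)) (n : Int)
    (hpre : Pre_findSubsetsSumDivisbleN q arr n) :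
    findSubsetsSumDivisbleN q arr n = findSubsetsSumDivisbleN_alt q arr n := by
  by_cases harr : arr = []
  · subst harr; rfl
  · have hn : n ≠ 0 := hpre.resolve_left harr
    have hne : arr.isEmpty = false := by simpa [List.isEmpty_iff] using harr
    rw [findSubsetsSumDivisbleN_alt]
    simp only [hne, Bool.false_eq_true, if_false]
    rw [findSubsetsSumDivisbleN, pvA_pairLoop_eq]
    have hs1 := pv_stage1 q n hn arr
    cases hp1 : pvB_pick (pvB_buckets n arr) n q [] with
    | some i =>
      rw [hp1] at hs1
      simp only [Option.map_some] at hs1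
      rw [← hs1]
    | none =>
      rw [hp1] at hs1
      simp only [Option.map_none] at hs1
      rw [← hs1]
      simp only [List.nil_append]
      rw [pvA_outer_eq]
      have hs2 := pv_stage2 q n hn arr
      cases hp2 : arr.findSome? (fun p1 =>
          (pvB_pick (pvB_buckets n arr) n (q + p1.2) [p1.1]).map (fun id2 => [p1.1, id2])) with
      | some r =>
        rw [hp2] at hs2
        rw [← hs2]
      | none =>
        rw [hp2] at hs2
        rw [← hs2]
        simp only [List.nil_append]
        rw [pvA_outer_eq]
        have hs3 := pv_stage3 q n hn arr
        cases hp3 : arr.findSome? (fun p1 => arr.findSome? (fun p2 =>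
            if p2.1 ≠ p1.1 then
              (pvB_pick (pvB_buckets n arr) n (q + p1.2 + p2.2) [p1.1, p2.1]).map
                (fun id3 => [p1.1, p2.1, id3])
            else none)) with
        | some r =>
          rw [hp3] at hs3
          rw [← hs3]
        | none =>
          rw [hp3] at hs3
          rw [← hs3]

-- ===== VERDICT (by name: the statement is the Claim_ definition above) =====
theorem findSubsetsSumDivisbleN_spec : Claim_equal_findSubsetsSumDivisbleN := by
  intro q arr n _ hpre
  exact main_eq q arr n hpre
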